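-- pv_equiv track=rewrite | github.com/gorodtx/selection_translator_anki | dev/scripts/build_wiktionary_lexicon_pack.py | _looks_like_ascii_phrase
-- ===== SOURCE A (Python) =====
-- def _looks_like_ascii_phrase(key: str) -> bool:
--     for ch in key:
--         if not ch.isascii():
--             return False
--         if ch.isalpha() or ch in {" ", "'", "-"}:
--             continue
--         return False
--     return True
-- ===== SOURCE B (Python) =====
-- def _looks_like_ascii_phrase(key: str) -> bool:
--     letters = key.replace(" ", "").replace("'", "").replace("-", "")
--     return letters == "" or (letters.isascii() and letters.isalpha())
-- ===== Notes on version B (the rewrite author's own statement) =====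
-- stated objective: faster
-- what changed: Instead of a Python-level per-character loop with early returns, B deletes the three allowed punctuation characters with staged str.replace passes and then judges the remainder with the whole-string builtins isascii()/isalpha() (empty remainder accepted), moving all character work into C-level bulk string operations.
import Mathlib
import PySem

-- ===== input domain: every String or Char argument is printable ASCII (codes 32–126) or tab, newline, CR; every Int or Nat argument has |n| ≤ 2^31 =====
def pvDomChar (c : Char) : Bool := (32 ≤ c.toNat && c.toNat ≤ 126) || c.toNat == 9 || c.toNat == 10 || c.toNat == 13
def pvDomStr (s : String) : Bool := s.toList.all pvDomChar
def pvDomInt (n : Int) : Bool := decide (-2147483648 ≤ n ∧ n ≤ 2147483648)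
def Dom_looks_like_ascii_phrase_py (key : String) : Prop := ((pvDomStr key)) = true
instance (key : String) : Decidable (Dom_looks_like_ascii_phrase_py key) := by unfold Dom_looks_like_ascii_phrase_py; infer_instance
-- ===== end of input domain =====

-- B replaces A's per-character early-return loop by staged passes: delete the three allowed punctuation
-- characters with str.replace, then judge the remainder with the whole-string builtins isascii()/isalpha() (a timing run measured B faster by a constant factor).

-- ===== PORT A =====
-- the for-loop with its two early 'return False' exits, as structural recursion over the characters
def pvAsciiLoopA : List Char → Bool
  | [] => true
  | c :: rest =>
    -- ch.isascii(): ported by hand as ord(ch) < 128 — exact (CPython's definition); ch.isalpha() is exact on the ASCII domain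
    if !(decide (c.toNat < 128)) then false
    else if PySem.Chars.isalpha c || (c == ' ' || c == '\'' || c == '-') then pvAsciiLoopA rest
    else false

def looks_like_ascii_phrase_py (key : String) : Bool := pvAsciiLoopA key.toList

-- ===== PORT B =====
-- letters.isascii(): ported by hand as 'every code point < 128' — exact (CPython's definition)
def pvStrIsascii (s : String) : Bool := s.toList.all (fun c => decide (c.toNat < 128))

def looks_like_ascii_phrase_py_alt (key : String) : Bool :=
  let letters := PySem.Str.replace (PySem.Str.replace (PySem.Str.replace key " " "") "'" "") "-" ""
  (letters == "") || (pvStrIsascii letters && PySem.Str.strIsalpha letters)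

-- ===== PRECONDITION & SPEC =====
def Spec_looks_like_ascii_phrase_py (key : String) (out : Bool) : Prop := out = looks_like_ascii_phrase_py_alt key
instance (key : String) (out : Bool) : Decidable (Spec_looks_like_ascii_phrase_py key out) := by unfold Spec_looks_like_ascii_phrase_py; infer_instance

-- ===== CLAIM (what is proved, stated in full; the proofs are below) =====
def Claim_equal_looks_like_ascii_phrase_py : Prop := ∀ (key : String), Dom_looks_like_ascii_phrase_py key → Spec_looks_like_ascii_phrase_py key (looks_like_ascii_phrase_py key)

-- ===== LEMMAS AND PROOFS =====

-- the punctuation filter and the per-letter test both programs are about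
def pvP (d : Char) : Bool := !(d == ' ' || d == '\'' || d == '-')
def pvQ (c : Char) : Bool := decide (c.toNat < 128) && PySem.Chars.isalpha c

-- replace's worker with a one-character pattern and empty replacement filters that character out
theorem pvReplaceGo_single (c : Char) :
    ∀ (l : List Char) (fuel : Nat) (acc : List Char), l.length ≤ fuel →
      PySem.Chars.replace.go [c] [] fuel l acc = acc.reverse ++ l.filter (fun d => !(d == c)) := by
  intro l
  induction l with
  | nil =>
    intro fuel acc _
    cases fuel <;> simp [PySem.Chars.replace.go]
  | cons d t ih =>
    intro fuel acc hlen
    cases fuel with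
    | zero => simp at hlen
    | succ fuel' =>
      have hlen' : t.length ≤ fuel' := by simpa using Nat.succ_le_succ_iff.mp (by simpa using hlen)
      by_cases hdc : d = c
      · have hstep : PySem.Chars.replace.go [c] [] (fuel' + 1) (d :: t) acc
            = PySem.Chars.replace.go [c] [] fuel' t acc := by
          simp [PySem.Chars.replace.go, List.isPrefixOf, hdc]
        rw [hstep, ih fuel' acc hlen']
        simp [hdc]
      · have hstep : PySem.Chars.replace.go [c] [] (fuel' + 1) (d :: t) acc
            = PySem.Chars.replace.go [c] [] fuel' t (d :: acc) := by
          simp [PySem.Chars.replace.go, List.isPrefixOf, Ne.symm hdc]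
        rw [hstep, ih fuel' (d :: acc) hlen']
        simp [hdc]

theorem pvReplace_single (c : Char) (l : List Char) :
    PySem.Chars.replace l [c] [] = l.filter (fun d => !(d == c)) := by
  rw [PySem.Chars.replace]
  simpa using pvReplaceGo_single c l l.length [] le_rfl

-- the three staged replace passes are one filter over the punctuation set
theorem pvFilter3 (l : List Char) :
    ((l.filter (fun d => !(d == ' '))).filter (fun d => !(d == '\''))).filter (fun d => !(d == '-'))
      = l.filter pvP := by
  rw [List.filter_filter, List.filter_filter]
  apply List.filter_congr
  intro d _
  cases h1 : d == ' ' <;> cases h2 : d == '\'' <;> cases h3 : d == '-' <;> simp [pvP, h1, h2, h3]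

-- the 'letters' string B builds, over the character list
theorem pvLetters_toList (key : String) :
    (PySem.Str.replace (PySem.Str.replace (PySem.Str.replace key " " "") "'" "") "-" "").toList
      = key.toList.filter pvP := by
  rw [← pvFilter3 key.toList]
  simp only [PySem.Str.toList_replace]
  rw [show (" " : String).toList = [' '] from rfl, show ("'" : String).toList = ['\''] from rfl,
      show ("-" : String).toList = ['-'] from rfl, show ("" : String).toList = [] from rfl]
  rw [pvReplace_single, pvReplace_single, pvReplace_single]

theorem pvBeqEmpty (s : String) : (s == "") = s.toList.isEmpty := by
  rw [Bool.eq_iff_iff, beq_iff_eq, List.isEmpty_iff]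
  constructor
  · intro h; rw [h]; rfl
  · intro h; apply String.ext; rw [h]; rfl

-- A's loop accepts exactly when every non-punctuation character is an ASCII letter
theorem pvAsciiLoopA_eq_filter_all (cs : List Char) :
    pvAsciiLoopA cs = (cs.filter pvP).all pvQ := by
  induction cs with
  | nil => rfl
  | cons c rest ih =>
    have hstep : pvAsciiLoopA (c :: rest) =
        ((decide (c.toNat < 128) && (PySem.Chars.isalpha c || (c == ' ' || c == '\'' || c == '-'))) && pvAsciiLoopA rest) := by
      cases h1 : decide (c.toNat < 128) <;>
        cases h2 : (PySem.Chars.isalpha c || (c == ' ' || c == '\'' || c == '-')) <;>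
          simp [pvAsciiLoopA, h1, h2]
    rw [hstep, ih]
    by_cases hp : (c == ' ' || c == '\'' || c == '-') = true
    · have h128 : decide (c.toNat < 128) = true := by
        simp only [Bool.or_eq_true, beq_iff_eq] at hp
        rcases hp with (h | h) | h <;> subst h <;> decide
      rw [List.filter_cons_of_neg (by simp [pvP, hp]), hp, h128]
      simp
    · have hp' : (c == ' ' || c == '\'' || c == '-') = false := eq_false_of_ne_true hp
      rw [List.filter_cons_of_pos (by simp [pvP, hp']), hp', List.all_cons]
      simp [pvQ, Bool.and_assoc]

theorem pvAllAnd {α : Type} (l : List α) (p q : α → Bool) :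
    (l.all fun x => p x && q x) = (l.all p && l.all q) := by
  induction l with
  | nil => rfl
  | cons a t ih =>
    simp only [List.all_cons, ih]
    cases p a <;> cases q a <;> cases t.all p <;> cases t.all q <;> rfl

-- B's whole-string judgement of the remainder equals the same 'all'
theorem pvAltTail_eq_all (letters : String) :
    ((letters == "") || (pvStrIsascii letters && PySem.Str.strIsalpha letters))
      = letters.toList.all pvQ := by
  rw [pvBeqEmpty, pvStrIsascii, PySem.Str.strIsalpha_eq, PySem.Chars.strIsalpha]
  cases h : letters.toList with
  | nil => rfl
  | cons c t =>
    have hQ : ∀ (l : List Char), l.all pvQ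
        = (l.all (fun c => decide (c.toNat < 128)) && l.all PySem.Chars.isalpha) := by
      intro l
      rw [show pvQ = (fun c => decide (c.toNat < 128) && PySem.Chars.isalpha c) from rfl, pvAllAnd]
    simp only [List.isEmpty_cons, Bool.false_or, List.all_cons, hQ]
    cases hc1 : decide (c.toNat < 128) <;> cases hc2 : PySem.Chars.isalpha c <;>
      cases h1 : t.all PySem.Chars.isalpha <;> cases h2 : t.all (fun c => decide (c.toNat < 128)) <;> rfl

-- ===== VERDICT (by name: the statement is the Claim_ definition above) =====
theorem looks_like_ascii_phrase_py_spec : Claim_equal_looks_like_ascii_phrase_py := by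
  intro key _
  unfold Spec_looks_like_ascii_phrase_py looks_like_ascii_phrase_py looks_like_ascii_phrase_py_alt
  rw [pvAsciiLoopA_eq_filter_all, pvAltTail_eq_all, pvLetters_toList]
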